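-- pv_equiv track=rewrite | github.com/J-Breciani/Programacao_1_Exercicios | questões de prova/av2/q3.py | f_inverte
-- ===== SOURCE A (Python) =====
-- def f_tamanho(n):
--     #declaração de variáveis
--     cont = int()
--     cont = 0
--     #processamento
--     while (n > 0):
--         n = n // 10
--         cont += 1
--
--     #valor de retorno
--     return cont
--
-- def f_inverte(n):
--     #declaração de variáveis
--     invertido = int(0)
--     pot = int(0)
--     resto = int(0)
--
--     #inicialização de variáveis
--     invertido = 0
--     pot = f_tamanho(n)-1
--
--     #processamento
--     while (n > 0):
--         resto = n % 10
--         invertido += resto * 10 ** pot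
--         n = n // 10
--         pot = pot - 1
--
--     #valor de retorno
--     return invertido
-- ===== SOURCE B (Python) =====
-- def f_inverte(n):
--     invertido = 0
--     while n > 0:
--         invertido = invertido * 10 + n % 10
--         n = n // 10
--     return invertido
-- ===== Notes on version B (the rewrite author's own statement) =====
-- stated objective: simpler
-- what changed: Drops the f_tamanho digit-count pass and the positional power-of-ten weights; builds the reversed number in a single Horner-style loop (accumulator = accumulator*base + last digit).
import Mathlib
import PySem

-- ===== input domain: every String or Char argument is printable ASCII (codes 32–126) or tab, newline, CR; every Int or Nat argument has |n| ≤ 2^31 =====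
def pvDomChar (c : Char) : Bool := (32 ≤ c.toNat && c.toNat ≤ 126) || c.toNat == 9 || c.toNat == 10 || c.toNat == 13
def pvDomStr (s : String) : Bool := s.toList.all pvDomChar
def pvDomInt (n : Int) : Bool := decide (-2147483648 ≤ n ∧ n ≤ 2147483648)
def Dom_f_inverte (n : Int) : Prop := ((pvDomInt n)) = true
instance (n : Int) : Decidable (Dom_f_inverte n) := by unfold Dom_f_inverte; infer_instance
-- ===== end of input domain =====

-- B replaces A's digit-count pass + positional 10**pot placement by a single
-- Horner-style accumulation loop (objective: simpler).

-- termination measure for the while-loops (n shrinks under n // 10)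
lemma pv_dec (n : Int) (h : 0 < n) : (PySem.Int.floordiv n 10).toNat < n.toNat := by
  rw [PySem.Int.floordiv_eq_ediv_of_pos (by norm_num)]
  omega

-- ===== PORT A =====
-- while (n > 0): n = n // 10; cont += 1
def f_tamanhoLoop (n cont : Int) : Int :=
  if 0 < n then f_tamanhoLoop (PySem.Int.floordiv n 10) (cont + 1) else cont
termination_by n.toNat
decreasing_by all_goals exact pv_dec _ (by assumption)

def f_tamanho (n : Int) : Int := f_tamanhoLoop n 0

-- while (n > 0): resto = n % 10; invertido += resto * 10 ** pot; n = n // 10; pot -= 1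
-- 10 ** pot: whenever evaluated, pot = f_tamanho n - 1 ≥ 0 (n > 0), so pot.toNat is exact.
def f_inverteLoop (n invertido pot : Int) : Int :=
  if 0 < n then
    f_inverteLoop (PySem.Int.floordiv n 10)
      (invertido + PySem.Int.mod n 10 * 10 ^ pot.toNat) (pot - 1)
  else invertido
termination_by n.toNat
decreasing_by all_goals exact pv_dec _ (by assumption)

def f_inverte (n : Int) : Int := f_inverteLoop n 0 (f_tamanho n - 1)

-- ===== PORT B =====
-- while n > 0: invertido = invertido * 10 + n % 10; n = n // 10
def f_inverteAltLoop (n invertido : Int) : Int :=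
  if 0 < n then
    f_inverteAltLoop (PySem.Int.floordiv n 10) (invertido * 10 + PySem.Int.mod n 10)
  else invertido
termination_by n.toNat
decreasing_by all_goals exact pv_dec _ (by assumption)

def f_inverte_alt (n : Int) : Int := f_inverteAltLoop n 0

-- ===== PRECONDITION & SPEC =====
def Spec_f_inverte (n : Int) (out : Int) : Prop := out = f_inverte_alt n
instance (n : Int) (out : Int) : Decidable (Spec_f_inverte n out) := by unfold Spec_f_inverte; infer_instance

-- ===== CLAIM (what is proved, stated in full; the proofs are below) =====
def Claim_equal_f_inverte : Prop := ∀ (n : Int), Dom_f_inverte n → Spec_f_inverte n (f_inverte n)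

-- ===== LEMMAS AND PROOFS =====

-- the length accumulator is a pure offset
lemma pv_tam_shift (n : Int) : ∀ c : Int, f_tamanhoLoop n c = c + f_tamanhoLoop n 0 := by
  intro c
  by_cases h : 0 < n
  · conv_lhs => rw [f_tamanhoLoop]
    conv_rhs => rw [f_tamanhoLoop]
    simp only [h, if_pos]
    rw [pv_tam_shift (PySem.Int.floordiv n 10) (c + 1),
        pv_tam_shift (PySem.Int.floordiv n 10) (0 + 1)]
    ring
  · conv_lhs => rw [f_tamanhoLoop]
    conv_rhs => rw [f_tamanhoLoop]
    simp [h]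
termination_by n.toNat
decreasing_by all_goals exact pv_dec _ (by assumption)

lemma pv_tam_nonneg (n : Int) : 0 ≤ f_tamanhoLoop n 0 := by
  by_cases h : 0 < n
  · rw [f_tamanhoLoop]
    simp only [h, if_pos]
    rw [pv_tam_shift]
    have := pv_tam_nonneg (PySem.Int.floordiv n 10)
    omega
  · rw [f_tamanhoLoop]; simp [h]
termination_by n.toNat
decreasing_by all_goals exact pv_dec _ (by assumption)

-- Horner accumulator shift: the accumulator sits in front, scaled by 10^(digit count)
lemma pv_alt_shift (n : Int) : ∀ acc : Int,
    f_inverteAltLoop n acc = acc * 10 ^ (f_tamanhoLoop n 0).toNat + f_inverteAltLoop n 0 := by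
  intro acc
  by_cases h : 0 < n
  · have ht : 0 ≤ f_tamanhoLoop (PySem.Int.floordiv n 10) 0 :=
      pv_tam_nonneg (PySem.Int.floordiv n 10)
    rw [f_inverteAltLoop]
    conv_rhs => rw [f_inverteAltLoop, f_tamanhoLoop]
    simp only [h, if_pos]
    rw [pv_alt_shift (PySem.Int.floordiv n 10) (acc * 10 + PySem.Int.mod n 10),
        pv_alt_shift (PySem.Int.floordiv n 10) (0 * 10 + PySem.Int.mod n 10),
        pv_tam_shift (PySem.Int.floordiv n 10) (0 + 1)]
    have : (0 + 1 + f_tamanhoLoop (PySem.Int.floordiv n 10) 0).toNat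
        = (f_tamanhoLoop (PySem.Int.floordiv n 10) 0).toNat + 1 := by omega
    rw [this]
    ring
  · rw [f_inverteAltLoop]
    conv_rhs => rw [f_inverteAltLoop, f_tamanhoLoop]
    simp [h]
termination_by n.toNat
decreasing_by all_goals exact pv_dec _ (by assumption)

-- A's loop started at pot = digit count − 1 equals B's Horner loop
lemma pv_main (n : Int) : ∀ inv : Int,
    f_inverteLoop n inv (f_tamanhoLoop n 0 - 1) = inv + f_inverteAltLoop n 0 := by
  intro inv
  by_cases h : 0 < n
  · have ht : 0 ≤ f_tamanhoLoop (PySem.Int.floordiv n 10) 0 :=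
      pv_tam_nonneg (PySem.Int.floordiv n 10)
    rw [f_inverteLoop]
    conv_rhs => rw [f_inverteAltLoop]
    simp only [h, if_pos]
    rw [f_tamanhoLoop]
    simp only [h, if_pos]
    rw [pv_tam_shift (PySem.Int.floordiv n 10) (0 + 1)]
    have h1 : 0 + 1 + f_tamanhoLoop (PySem.Int.floordiv n 10) 0 - 1 - 1
        = f_tamanhoLoop (PySem.Int.floordiv n 10) 0 - 1 := by ring
    rw [h1, pv_main (PySem.Int.floordiv n 10)]
    rw [pv_alt_shift (PySem.Int.floordiv n 10) (0 * 10 + PySem.Int.mod n 10)]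
    have h2 : (0 + 1 + f_tamanhoLoop (PySem.Int.floordiv n 10) 0 - 1).toNat
        = (f_tamanhoLoop (PySem.Int.floordiv n 10) 0).toNat := by omega
    rw [h2]
    ring
  · rw [f_inverteLoop]
    conv_rhs => rw [f_inverteAltLoop]
    simp [h]
termination_by n.toNat
decreasing_by all_goals exact pv_dec _ (by assumption)

-- ===== VERDICT (by name: the statement is the Claim_ definition above) =====
theorem f_inverte_spec : Claim_equal_f_inverte := by
  intro n _
  unfold Spec_f_inverte f_inverte f_inverte_alt f_tamanho
  rw [pv_main]
  ring
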